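-- pv_equiv track=rewrite | github.com/db-Lee/iclr2026-5078 | multigenprm/data/deprecated_preprocess_noisy_data.py | normalize_process_labels
-- ===== SOURCE A (Python) =====
-- def get_first_error_step_index(labels):
--     """Helper function to find first error position"""
--     for i, label in enumerate(labels):
--         if label == -1:
--             return i
--     return len(labels)
--
-- def normalize_process_labels(labels):
--     """
--     Normalize labels to valid process format: [1,1,1,...,-1,-1,-1,...]
--     Once we find the first -1, all subsequent labels become -1.
--     """
--     if not labels:
--         return []
--
--     normalized = labels.copy()
--     first_error_pos = get_first_error_step_index(labels)
--
--     # Make all labels after first error position become -1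
--     for i in range(first_error_pos, len(normalized)):
--         normalized[i] = -1
--
--     return normalized
-- ===== SOURCE B (Python) =====
-- def normalize_process_labels(labels):
--     """Single pass: copy values until the first -1, then emit -1 for the rest."""
--     if not labels:
--         return []
--     result = []
--     seen_error = False
--     for label in labels:
--         if label == -1:
--             seen_error = True
--         result.append(-1 if seen_error else label)
--     return result
-- ===== Notes on version B (the rewrite author's own statement) =====
-- stated objective: simpler
-- what changed: Replaced A's two passes (find first -1 index, then overwrite a copied list from that index) by one pass carrying a seen_error flag that builds the result list directly.
import Mathlib
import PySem

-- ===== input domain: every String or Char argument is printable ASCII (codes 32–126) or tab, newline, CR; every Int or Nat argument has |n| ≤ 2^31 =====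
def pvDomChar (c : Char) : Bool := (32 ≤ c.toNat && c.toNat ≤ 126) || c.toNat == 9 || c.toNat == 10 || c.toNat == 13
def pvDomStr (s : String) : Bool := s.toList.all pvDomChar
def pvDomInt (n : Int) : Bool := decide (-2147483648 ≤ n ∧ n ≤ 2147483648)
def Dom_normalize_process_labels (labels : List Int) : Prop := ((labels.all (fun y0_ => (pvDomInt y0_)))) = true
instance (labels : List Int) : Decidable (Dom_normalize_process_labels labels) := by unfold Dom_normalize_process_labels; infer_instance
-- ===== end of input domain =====

-- B replaces A's two passes (find first -1, then overwrite from there) by one pass with a seen_error flag; same values, simpler shape.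
-- ===== PORT A =====
-- helper: get_first_error_step_index (returns first index with label -1, else len(labels))
def get_first_error_step_index : List Int → Nat
  | [] => 0
  | x :: xs => if x = -1 then 0 else 1 + get_first_error_step_index xs

def normalize_process_labels (labels : List Int) : List Int :=
  if labels = [] then []
  else
    -- normalized = labels.copy(); for i in range(first_error_pos, len(normalized)): normalized[i] = -1
    let first_error_pos := get_first_error_step_index labels
    (PySem.List.pyRange (first_error_pos : Int) (labels.length : Int) 1).foldl
      (fun normalized i => normalized.set i.toNat (-1)) labels

-- ===== PORT B =====
-- the loop of Source B: seen_error flag, appending -1 once the flag is set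
def npl_go (seen_error : Bool) : List Int → List Int
  | [] => []
  | label :: rest =>
    let seen' := seen_error || (label = -1)
    (if seen' then -1 else label) :: npl_go seen' rest

def normalize_process_labels_alt (labels : List Int) : List Int :=
  if labels = [] then [] else npl_go false labels

-- ===== PRECONDITION & SPEC =====
def Spec_normalize_process_labels (labels : List Int) (out : List Int) : Prop := out = normalize_process_labels_alt labels
instance (labels : List Int) (out : List Int) : Decidable (Spec_normalize_process_labels labels out) := by unfold Spec_normalize_process_labels; infer_instance

-- ===== CLAIM (what is proved, stated in full; the proofs are below) =====
def Claim_equal_normalize_process_labels : Prop := ∀ (labels : List Int), Dom_normalize_process_labels labels → Spec_normalize_process_labels labels (normalize_process_labels labels)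

-- ===== LEMMAS AND PROOFS =====

lemma fei_le (l : List Int) : get_first_error_step_index l ≤ l.length := by
  induction l with
  | nil => simp [get_first_error_step_index]
  | cons x xs ih =>
    simp only [get_first_error_step_index, List.length_cons]
    split_ifs <;> omega

-- A's overwrite loop, characterised: keep the first p elements, replace the rest by -1
lemma foldset_range (l : List Int) (p : Nat) (hp : p ≤ l.length) :
    (PySem.List.pyRange (p : Int) (l.length : Int) 1).foldl
      (fun normalized i => normalized.set i.toNat (-1)) l
    = l.take p ++ List.replicate (l.length - p) (-1) := by
  obtain ⟨n, hn⟩ : ∃ n, n = l.length - p := ⟨l.length - p, rfl⟩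
  induction n generalizing l p with
  | zero =>
    have hpl : p = l.length := by omega
    subst hpl
    simp
  | succ n ih =>
    have hlt : p < l.length := by omega
    rw [PySem.List.pyRange_one_cons (by exact_mod_cast hlt)]
    simp only [List.foldl_cons]
    have hstep : ((p : Int) + 1) = ((p + 1 : Nat) : Int) := by push_cast; ring
    have hlen : (l.set p (-1)).length = l.length := by simp
    rw [hstep, show ((p : Int)).toNat = p from by simp, ← hlen,
      ih (l.set p (-1)) (p + 1) (by omega) (by omega)]
    rw [hlen]
    have htake : (l.set p (-1)).take (p + 1) = l.take p ++ [(-1 : Int)] := by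
      rw [List.set_eq_take_append_cons_drop, if_pos hlt]
      rw [List.take_append]
      simp [List.length_take, Nat.min_eq_left (le_of_lt hlt)]
    rw [htake, List.append_assoc]
    congr 1
    have : l.length - p = n + 1 := by omega
    rw [this, show l.length - (p+1) = n from by omega, List.replicate_succ]
    simp

-- B's loop with the flag set: everything becomes -1
lemma npl_go_true (l : List Int) : npl_go true l = List.replicate l.length (-1) := by
  induction l with
  | nil => rfl
  | cons x xs ih => simp [npl_go, ih, List.replicate_succ]

-- B's loop, characterised the same way
lemma npl_go_false (l : List Int) :
    npl_go false l
    = l.take (get_first_error_step_index l)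
      ++ List.replicate (l.length - get_first_error_step_index l) (-1) := by
  induction l with
  | nil => rfl
  | cons x xs ih =>
    by_cases hx : x = -1
    · simp [npl_go, hx, get_first_error_step_index, npl_go_true, List.replicate_succ]
    · have hle := fei_le xs
      simp only [npl_go, get_first_error_step_index, if_neg hx, decide_eq_true_eq,
        Bool.false_or]
      rw [show (decide (x = -1)) = false from by simp [hx], ih]
      simp only [List.length_cons]
      rw [show 1 + get_first_error_step_index xs = get_first_error_step_index xs + 1 from
        by omega, List.take_succ_cons,
        show xs.length + 1 - (get_first_error_step_index xs + 1)
          = xs.length - get_first_error_step_index xs from by omega]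
      simp

-- ===== VERDICT (by name: the statement is the Claim_ definition above) =====
theorem normalize_process_labels_spec : Claim_equal_normalize_process_labels := by
  intro labels _
  unfold Spec_normalize_process_labels normalize_process_labels normalize_process_labels_alt
  by_cases h : labels = []
  · simp [h]
  · rw [if_neg h, if_neg h, foldset_range labels _ (fei_le labels), npl_go_false]
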